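-- pv_equiv track=rewrite | github.com/yguo0102/n2c2_2022_classification | n2c2_code/extract_data_fixed_len.py | adjust_next_window
-- ===== SOURCE A (Python) =====
-- def adjust_next_window(text, index, n_words):
--     if index >= len(text)-1:
--         return index
--
--     while n_words > 0 and index < len(text)-1:
--         index += 1
--         if text[index] is ' ':
--             n_words -= 1
--
--     return index
-- ===== SOURCE B (Python) =====
-- def adjust_next_window(text, index, n_words):
--     n = len(text)
--     if index >= n - 1 or n_words <= 0:
--         return index
--     after = [p for p, ch in enumerate(text) if ch == ' ' and p > index]
--     if n_words <= len(after):
--         return after[n_words - 1]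
--     return n - 1
-- ===== Notes on version B (the rewrite author's own statement) =====
-- stated objective: alternative
-- what changed: Replaces the character-by-character while loop with mutable index/counter by a one-shot comprehension collecting the space positions after index and directly selecting the n_words-th one (falling back to len(text)-1).
-- intended difference: For index <= -2 (with the loop entered and enough spaces reachable) A's negative indexing wraps around, scanning the text's tail and then restarting from position 0, returning a negative or too-early position; B treats a negative index as 'before the start' and returns the n_words-th space position of the text, the intended value. — e.g. on adjust_next_window("ab ", -2, 1): A returns -1, B returns 2
import Mathlib
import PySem

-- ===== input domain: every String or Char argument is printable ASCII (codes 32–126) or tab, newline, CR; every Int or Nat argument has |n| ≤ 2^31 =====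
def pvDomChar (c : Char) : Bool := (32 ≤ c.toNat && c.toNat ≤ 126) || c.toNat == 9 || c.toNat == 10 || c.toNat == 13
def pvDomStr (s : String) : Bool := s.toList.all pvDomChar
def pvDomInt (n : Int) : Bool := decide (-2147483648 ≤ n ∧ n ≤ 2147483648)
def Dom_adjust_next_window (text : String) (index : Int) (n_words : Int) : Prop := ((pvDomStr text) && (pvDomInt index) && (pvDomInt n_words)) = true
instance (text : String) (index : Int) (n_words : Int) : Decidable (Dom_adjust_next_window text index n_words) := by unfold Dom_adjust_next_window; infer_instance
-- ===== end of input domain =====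

-- B replaces A's character-by-character while loop (mutable index and counter) by collecting the
-- space positions after `index` in one comprehension and selecting the n_words-th one directly.

-- ===== PORT A =====
-- the fuel argument only makes the while loop structurally recursive; it always equals the exact
-- number of remaining loop iterations, so no behaviour is guarded away.
def adjWhile (chars : List Char) (fuel : Nat) (index : Int) (n_words : Int) : Int :=
  match fuel with
  | 0 => index
  | Nat.succ f =>
    if 0 < n_words ∧ index < (chars.length : Int) - 1 then
      match PySem.List.pyGet? chars (index + 1) with
      | some c => adjWhile chars f (index + 1) (if c = ' ' then n_words - 1 else n_words)
      | none => index + 1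
    else index

def adjust_next_window (text : String) (index : Int) (n_words : Int) : Int :=
  let chars := text.toList
  if index ≥ (chars.length : Int) - 1 then index
  else adjWhile chars ((chars.length : Int) - 1 - index).toNat index n_words

-- ===== PORT B =====
def adjust_next_window_alt (text : String) (index : Int) (n_words : Int) : Int :=
  let chars := text.toList
  let n : Int := chars.length
  if index ≥ n - 1 ∨ n_words ≤ 0 then index
  else
    let after := ((PySem.List.enumerate chars 0).filter
        (fun pc => decide (pc.2 = ' ' ∧ index < pc.1))).map (·.1)
    if n_words ≤ (after.length : Int) then PySem.List.pyGetD after (n_words - 1) 0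
    else n - 1


-- ===== PRECONDITION & SPEC =====
-- Pre_ excludes exactly the inputs on which Python A raises IndexError: the loop is entered and
-- its first read text[index+1] has index+1 < -len(text).
def Pre_adjust_next_window (text : String) (index : Int) (n_words : Int) : Prop :=
  ¬ (1 ≤ n_words ∧ index < (text.toList.length : Int) - 1 ∧ index + 1 < -(text.toList.length : Int))
instance (text : String) (index : Int) (n_words : Int) : Decidable (Pre_adjust_next_window text index n_words) := by unfold Pre_adjust_next_window; infer_instance
def pvWitness_adjust_next_window : String × Int × Int := ("a b c", 0, 1)

-- For index <= -2 with the loop entered and enough reachable spaces, A's negative indexing wraps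
-- around: it scans the text's tail and then restarts from position 0, returning a negative or
-- too-early position; B treats a negative index as 'before the start' and returns the n_words-th
-- space position of the text (or len(text)-1), the intended value.
def D_adjust_next_window (text : String) (index : Int) (n_words : Int) : Prop :=
  let t : Int := (PySem.List.slice text.toList (some (index + 1)) none).count ' '
  index ≤ -2 ∧ 1 ≤ n_words ∧ 1 ≤ t ∧ n_words ≤ t + (text.toList.dropLast.count ' ' : Int)
instance (text : String) (index : Int) (n_words : Int) : Decidable (D_adjust_next_window text index n_words) := by unfold D_adjust_next_window; infer_instance

def Spec_adjust_next_window (text : String) (index : Int) (n_words : Int) (out : Int) : Prop := ¬ D_adjust_next_window text index n_words → out = adjust_next_window_alt text index n_words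
instance (text : String) (index : Int) (n_words : Int) (out : Int) : Decidable (Spec_adjust_next_window text index n_words out) := by unfold Spec_adjust_next_window; infer_instance

def pvDiffWitness_adjust_next_window : String × Int × Int := ("ab ", -2, 1)
def pvDiffWitnessOut_adjust_next_window : Int × Int := (-1, 2)

-- ===== CLAIM (what is proved, stated in full; the proofs are below) =====
def Claim_unchanged_adjust_next_window : Prop := ∀ (text : String) (index : Int) (n_words : Int), Dom_adjust_next_window text index n_words → Pre_adjust_next_window text index n_words → Spec_adjust_next_window text index n_words (adjust_next_window text index n_words)
def Claim_changed_adjust_next_window : Prop := Dom_adjust_next_window (pvDiffWitness_adjust_next_window.1) (pvDiffWitness_adjust_next_window.2.1) (pvDiffWitness_adjust_next_window.2.2) ∧ Pre_adjust_next_window (pvDiffWitness_adjust_next_window.1) (pvDiffWitness_adjust_next_window.2.1) (pvDiffWitness_adjust_next_window.2.2) ∧ D_adjust_next_window (pvDiffWitness_adjust_next_window.1) (pvDiffWitness_adjust_next_window.2.1) (pvDiffWitness_adjust_next_window.2.2) ∧ adjust_next_window (pvDiffWitness_adjust_next_window.1) (pvDiffWitness_adjust_next_window.2.1) (pvDiffWitness_adjust_next_window.2.2)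 = pvDiffWitnessOut_adjust_next_window.1 ∧ adjust_next_window_alt (pvDiffWitness_adjust_next_window.1) (pvDiffWitness_adjust_next_window.2.1) (pvDiffWitness_adjust_next_window.2.2) = pvDiffWitnessOut_adjust_next_window.2 ∧ pvDiffWitnessOut_adjust_next_window.1 ≠ pvDiffWitnessOut_adjust_next_window.2
def Claim_exact_adjust_next_window : Prop := ∀ (text : String) (index : Int) (n_words : Int), Dom_adjust_next_window text index n_words → Pre_adjust_next_window text index n_words → D_adjust_next_window text index n_words → adjust_next_window text index n_words ≠ adjust_next_window_alt text index n_words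

-- ===== LEMMAS AND PROOFS =====

def spacePos (chars : List Char) : List Int :=
  ((PySem.List.enumerate chars 0).filter (fun pc => decide (pc.2 = ' '))).map (·.1)

lemma after_eq_filter_spacePos (chars : List Char) (index : Int) :
    ((PySem.List.enumerate chars 0).filter (fun pc => decide (pc.2 = ' ' ∧ index < pc.1))).map (·.1)
      = (spacePos chars).filter (fun x => decide (index < x)) := by
  unfold spacePos
  rw [List.filter_map, List.filter_filter]
  congr 1
  apply List.filter_congr
  intro pc _
  simp [Function.comp, Bool.and_comm]

lemma mem_spacePos (chars : List Char) (x : Int) :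
    x ∈ spacePos chars ↔ ∃ (k : Nat) (h : k < chars.length), chars[k] = ' ' ∧ (k : Int) = x := by
  unfold spacePos
  simp only [List.mem_map, List.mem_filter, PySem.List.mem_enumerate_iff]
  constructor
  · rintro ⟨pc, ⟨⟨k, hk, rfl⟩, hsp⟩, rfl⟩
    refine ⟨k, hk, ?_, by simp⟩
    simpa using hsp
  · rintro ⟨k, hk, hsp, rfl⟩
    refine ⟨((0 : Int) + (k : Int), chars[k]), ⟨⟨k, hk, rfl⟩, by simpa using hsp⟩, by simp⟩

lemma spacePos_nonneg (chars : List Char) (x : Int) (hx : x ∈ spacePos chars) : 0 ≤ x := by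
  rw [mem_spacePos] at hx
  obtain ⟨k, _, _, rfl⟩ := hx
  positivity

lemma spacePos_pairwise (chars : List Char) : (spacePos chars).Pairwise (· < ·) := by
  unfold spacePos
  refine List.Pairwise.map _ (fun a b h => h) ?_
  exact (PySem.List.pairwise_lt_enumerate chars 0).filter _

lemma spacePos_lt_length (chars : List Char) (x : Int) (hx : x ∈ spacePos chars) :
    x < (chars.length : Int) := by
  rw [mem_spacePos] at hx
  obtain ⟨k, hk, _, rfl⟩ := hx
  exact_mod_cast hk

lemma mem_spacePos_iff_getElem (chars : List Char) (p : Nat) (hp : p < chars.length) :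
    ((p : Int) ∈ spacePos chars) ↔ chars[p] = ' ' := by
  rw [mem_spacePos]
  constructor
  · rintro ⟨k, hk, hsp, hkp⟩
    have : k = p := by exact_mod_cast hkp
    subst this; exact hsp
  · intro h; exact ⟨p, hp, h, rfl⟩

lemma filter_gt_step (sp : List Int) (hp : sp.Pairwise (· < ·)) (i : Int) :
    sp.filter (fun x => decide (i < x)) =
      (if i + 1 ∈ sp then [i + 1] else []) ++ sp.filter (fun x => decide (i + 1 < x)) := by
  induction sp with
  | nil => simp
  | cons a tl ih =>
    have hpa : ∀ x ∈ tl, a < x := (List.pairwise_cons.mp hp).1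
    have htl := (List.pairwise_cons.mp hp).2
    by_cases hia : i < a
    · by_cases hae : a = i + 1
      · subst hae
        rw [if_pos (List.mem_cons_self)]
        simp only [List.filter_cons, decide_eq_true_eq]
        rw [if_pos hia, if_neg (by omega : ¬ (i + 1 < i + 1))]
        simp only [List.cons_append, List.nil_append, List.cons.injEq, true_and]
        apply List.filter_congr
        intro x hx
        have := hpa x hx
        simp only [decide_eq_decide]
        omega
      · have h2 : i + 1 < a := by omega
        have h3 : (i + 1) ∉ a :: tl := by
          intro h
          rcases List.mem_cons.mp h with h | h
          · exact hae h.symm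
          · exact absurd (hpa _ h) (by omega)
        rw [if_neg h3]
        simp only [List.filter_cons, decide_eq_true_eq]
        rw [if_pos hia, if_pos h2]
        simp only [List.nil_append, List.cons.injEq, true_and]
        apply List.filter_congr
        intro x hx
        have := hpa x hx
        simp only [decide_eq_decide]
        omega
    · have h5 : ¬ (i + 1 < a) := by omega
      have h6 : (i + 1) ∈ a :: tl ↔ (i + 1) ∈ tl := by
        constructor
        · intro h
          rcases List.mem_cons.mp h with h | h
          · omega
          · exact h
        · exact fun h => List.mem_cons_of_mem _ h
      simp only [h6]
      rw [List.filter_cons, List.filter_cons]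
      simp only [decide_eq_true_eq]
      rw [if_neg hia, if_neg h5]
      exact ih htl

def bval (chars : List Char) (index : Int) (w : Int) : Int :=
  let after := (spacePos chars).filter (fun x => decide (index < x))
  if w ≤ (after.length : Int) then after.getD (w - 1).toNat 0 else (chars.length : Int) - 1

lemma alt_eq_bval (text : String) (index : Int) (w : Int)
    (h1 : index < (text.toList.length : Int) - 1) (h2 : 1 ≤ w) :
    adjust_next_window_alt text index w = bval text.toList index w := by
  unfold adjust_next_window_alt bval
  simp only [after_eq_filter_spacePos]
  rw [if_neg (by omega : ¬ (index ≥ (text.toList.length : Int) - 1 ∨ w ≤ 0))]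
  set after := (spacePos text.toList).filter (fun x => decide (index < x)) with hafter
  by_cases hw : w ≤ (after.length : Int)
  · rw [if_pos hw, if_pos hw]
    have hlt : (w - 1).toNat < after.length := by omega
    rw [PySem.List.pyGetD_eq_getElem after 0 (by omega) (by omega), List.getD_eq_getElem _ _ hlt]
  · rw [if_neg hw, if_neg hw]

lemma adjWhile_succ (chars : List Char) (f : Nat) (i w : Int) :
    adjWhile chars (f + 1) i w =
      if 0 < w ∧ i < (chars.length : Int) - 1 then
        match PySem.List.pyGet? chars (i + 1) with
        | some c => adjWhile chars f (i + 1) (if c = ' ' then w - 1 else w)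
        | none => i + 1
      else i := rfl

lemma adjWhile_nonpos (chars : List Char) (fuel : Nat) (i w : Int) (hw : w ≤ 0) :
    adjWhile chars fuel i w = i := by
  cases fuel with
  | zero => rfl
  | succ f => simp only [adjWhile]; rw [if_neg (by omega)]

lemma adjWhile_eq_bval : ∀ (fuel : Nat) (chars : List Char) (index w : Int),
    (fuel : Int) = (chars.length : Int) - 1 - index → -1 ≤ index → 1 ≤ w →
    adjWhile chars fuel index w = bval chars index w := by
  intro fuel
  induction fuel with
  | zero =>
    intro chars index w hf h0 h2
    have hidx : index = (chars.length : Int) - 1 := by simp at hf; omega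
    have hempty : (spacePos chars).filter (fun x => decide (index < x)) = [] := by
      rw [List.filter_eq_nil_iff]
      intro x hx
      have := spacePos_lt_length chars x hx
      simp only [decide_eq_true_eq]
      omega
    simp only [adjWhile, bval, hempty]
    rw [if_neg (by simp; omega)]
    omega
  | succ f ih =>
    intro chars index w hf h0 h2
    have hlt : index < (chars.length : Int) - 1 := by
      have : ((f : Int) + 1) = (chars.length : Int) - 1 - index := by exact_mod_cast hf
      omega
    have hp0 : 0 ≤ index + 1 := by omega
    have hpn : index + 1 < (chars.length : Int) := by omega
    have hpN : (index + 1).toNat < chars.length := by omega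
    have hget : PySem.List.pyGet? chars (index + 1) = some chars[(index + 1).toNat] :=
      PySem.List.pyGet?_eq_some_getElem chars hp0 hpn
    have hcast : ((index + 1).toNat : Int) = index + 1 := by omega
    have hstep := filter_gt_step (spacePos chars) (spacePos_pairwise chars) index
    have hmem : ((index + 1) ∈ spacePos chars) ↔ chars[(index + 1).toNat] = ' ' := by
      have h := mem_spacePos_iff_getElem chars _ hpN
      rwa [hcast] at h
    rw [adjWhile_succ, if_pos ⟨by omega, hlt⟩]
    simp only [hget]
    by_cases hsp : chars[(index + 1).toNat] = ' '
    · rw [if_pos hsp]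
      have hmem' : (index + 1) ∈ spacePos chars := hmem.mpr hsp
      rw [if_pos hmem'] at hstep
      by_cases hw1 : w = 1
      · subst hw1
        rw [adjWhile_nonpos chars f (index + 1) (1 - 1) (by omega)]
        unfold bval
        rw [hstep]
        simp only [List.cons_append, List.nil_append]
        rw [if_pos (show (1 : Int) ≤ ((((index + 1) :: (spacePos chars).filter (fun x => decide (index + 1 < x))).length : Nat) : Int) by simp only [List.length_cons]; push_cast; omega)]
        simp
      · rw [ih chars (index + 1) (w - 1) (by push_cast at hf ⊢; omega) (by omega) (by omega)]
        unfold bval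
        rw [hstep]
        simp only [List.cons_append, List.nil_append, List.length_cons]
        by_cases hw : w - 1 ≤ (((spacePos chars).filter (fun x => decide (index + 1 < x))).length : Int)
        · rw [if_pos hw, if_pos (show w ≤ ((((spacePos chars).filter (fun x => decide (index + 1 < x))).length + 1 : Nat) : Int) by push_cast; omega)]
          rw [show (w - 1).toNat = (w - 1 - 1).toNat + 1 by omega, List.getD_cons_succ]
        · rw [if_neg hw, if_neg (show ¬ w ≤ ((((spacePos chars).filter (fun x => decide (index + 1 < x))).length + 1 : Nat) : Int) by push_cast; omega)]
    · rw [if_neg hsp]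
      have hmem' : (index + 1) ∉ spacePos chars := fun h => hsp (hmem.mp h)
      rw [if_neg hmem'] at hstep
      simp only [List.nil_append] at hstep
      rw [ih chars (index + 1) w (by push_cast at hf ⊢; omega) (by omega) h2]
      unfold bval
      rw [hstep]

lemma adjWhile_neg_phase : ∀ (k : Nat) (chars : List Char) (w : Int),
    1 ≤ k → k ≤ chars.length →
    ((chars.drop (chars.length - k)).count ' ' : Int) < w →
    adjWhile chars (chars.length + k) (-1 - (k : Int)) w
      = adjWhile chars chars.length (-1) (w - ((chars.drop (chars.length - k)).count ' ' : Int)) := by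
  intro k
  induction k with
  | zero => intro chars w h1 _ _; omega
  | succ k ih =>
    intro chars w hk1 hk2 ht
    have hcnt : (0 : Int) ≤ ((chars.drop (chars.length - (k + 1))).count ' ' : Int) := by positivity
    have hidx : chars.length - (k + 1) < chars.length := by omega
    have hdrop : chars.drop (chars.length - (k + 1))
        = chars[chars.length - (k + 1)] :: chars.drop (chars.length - (k + 1) + 1) :=
      List.drop_eq_getElem_cons hidx
    have hget : PySem.List.pyGet? chars (-1 - ((k : Int) + 1) + 1)
        = some chars[chars.length - (k + 1)] := by
      have he : (-1 - ((k : Int) + 1) + 1) = -((k + 1 : Nat) : Int) := by push_cast; ring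
      rw [he, PySem.List.pyGet?_neg_natCast chars (k + 1) (by omega) hk2]
      rw [List.getElem?_eq_getElem hidx]
    rw [show chars.length + (k + 1) = (chars.length + k) + 1 from rfl, adjWhile_succ]
    push_cast
    rw [if_pos ⟨by omega, by omega⟩]
    simp only [hget]
    rw [show (-1 - ((k : Int) + 1) + 1) = -1 - (k : Int) by ring]
    by_cases hk0 : k = 0
    · subst hk0
      simp only [Nat.cast_zero, sub_zero, Nat.add_zero]
      have hdl : chars.length - (0 + 1) + 1 = chars.length := by omega
      rw [hdl, List.drop_length] at hdrop
      rw [hdrop, List.count_cons]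
      by_cases hsp : chars[chars.length - (0 + 1)] = ' '
      · rw [if_pos hsp]
        simp [hsp]
      · rw [if_neg hsp]
        simp [hsp]
    · have hk1' : 1 ≤ k := by omega
      have hstep : chars.length - (k + 1) + 1 = chars.length - k := by omega
      rw [hstep] at hdrop
      have hcount : ((chars.drop (chars.length - (k + 1))).count ' ' : Int)
          = ((chars.drop (chars.length - k)).count ' ' : Int)
            + (if chars[chars.length - (k + 1)] = ' ' then 1 else 0) := by
        rw [hdrop, List.count_cons]
        by_cases hsp : chars[chars.length - (k + 1)] = ' ' <;> simp [hsp]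
      by_cases hsp : chars[chars.length - (k + 1)] = ' '
      · rw [if_pos hsp]
        rw [ih chars (w - 1) hk1' (by omega) (by rw [hcount, if_pos hsp] at ht; omega)]
        rw [hcount, if_pos hsp]
        rw [show w - (((chars.drop (chars.length - k)).count ' ' : Int) + 1)
            = w - 1 - ((chars.drop (chars.length - k)).count ' ' : Int) by ring]
      · rw [if_neg hsp]
        rw [ih chars w hk1' (by omega) (by rw [hcount, if_neg hsp] at ht; omega)]
        rw [hcount, if_neg hsp]
        rw [show w - (((chars.drop (chars.length - k)).count ' ' : Int) + 0)
            = w - ((chars.drop (chars.length - k)).count ' ' : Int) by ring]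

lemma adjWhile_overrun : ∀ (fuel : Nat) (chars : List Char) (i u : Int),
    (fuel : Int) = (chars.length : Int) - 1 - i → -1 ≤ i → 1 ≤ u →
    ((chars.dropLast.drop (i + 1).toNat).count ' ' : Int) < u →
    adjWhile chars fuel i u = (chars.length : Int) - 1 := by
  intro fuel
  induction fuel with
  | zero =>
    intro chars i u hf h0 h2 hs
    have : i = (chars.length : Int) - 1 := by simp at hf; omega
    simp [adjWhile, this]
  | succ f ih =>
    intro chars i u hf h0 h2 hs
    have hf' : ((f : Int) + 1) = (chars.length : Int) - 1 - i := by exact_mod_cast hf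
    have hlt : i < (chars.length : Int) - 1 := by omega
    have hget : PySem.List.pyGet? chars (i + 1) = some chars[(i + 1).toNat] :=
      PySem.List.pyGet?_eq_some_getElem chars (by omega) (by omega)
    rw [adjWhile_succ, if_pos ⟨by omega, hlt⟩]
    simp only [hget]
    by_cases hf0 : f = 0
    · subst hf0
      have h9 : i + 1 = (chars.length : Int) - 1 := by omega
      split <;> simpa [adjWhile] using h9
    · have hlt2 : i + 1 < (chars.length : Int) - 1 := by omega
      have hdlen : (i + 1).toNat < chars.dropLast.length := by
        rw [List.length_dropLast]; omega
      have hdrop : chars.dropLast.drop ((i + 1).toNat)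
          = chars.dropLast[(i + 1).toNat] :: chars.dropLast.drop ((i + 1).toNat + 1) :=
        List.drop_eq_getElem_cons hdlen
      have hgd : chars.dropLast[(i + 1).toNat] = chars[(i + 1).toNat] :=
        List.getElem_dropLast hdlen
      have htn : (i + 1).toNat + 1 = (i + 1 + 1).toNat := by omega
      have hcount : ((chars.dropLast.drop ((i + 1).toNat)).count ' ' : Int)
          = ((chars.dropLast.drop ((i + 1 + 1).toNat)).count ' ' : Int)
            + (if chars[(i + 1).toNat] = ' ' then 1 else 0) := by
        rw [hdrop, List.count_cons, hgd, htn]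
        by_cases hsp : chars[(i + 1).toNat] = ' ' <;> simp [hsp]
      by_cases hsp : chars[(i + 1).toNat] = ' '
      · rw [if_pos hsp]
        exact ih chars (i + 1) (u - 1) (by omega) (by omega)
          (by rw [hcount] at hs; simp [hsp] at hs; omega)
          (by rw [hcount] at hs; simp [hsp] at hs; omega)
      · rw [if_neg hsp]
        exact ih chars (i + 1) u (by omega) (by omega) h2
          (by rw [hcount] at hs; simp [hsp] at hs; omega)

lemma length_spacePos (chars : List Char) :
    (spacePos chars).length = chars.countP (fun c => decide (c = ' ')) := by
  unfold spacePos
  rw [List.length_map, ← List.countP_eq_length_filter]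
  conv_rhs => rw [← PySem.List.map_snd_enumerate chars 0]
  rw [List.countP_map]
  rfl

lemma countP_space_eq_count (l : List Char) :
    l.countP (fun c => decide (c = ' ')) = l.count ' ' := by
  rw [List.count]
  apply List.countP_congr
  intro c _
  simp

lemma spacePos_length_le (chars : List Char) (h : chars ≠ []) :
    ((spacePos chars).length : Int) ≤ (chars.dropLast.count ' ' : Int) + 1 := by
  rw [length_spacePos]
  have hsplit : chars.countP (fun c => decide (c = ' '))
      = chars.dropLast.countP (fun c => decide (c = ' '))
        + ([chars.getLast h].countP (fun c => decide (c = ' '))) := by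
    conv_lhs => rw [← List.dropLast_append_getLast h]
    rw [List.countP_append]
  have hone : ([chars.getLast h].countP (fun c => decide (c = ' '))) ≤ 1 := by
    simp only [List.countP_cons, List.countP_nil]
    split_ifs <;> omega
  have h8 := countP_space_eq_count chars.dropLast
  omega

theorem main_assembly (text : String) (index w : Int)
    (hpre : Pre_adjust_next_window text index w)
    (hnd : ¬ D_adjust_next_window text index w) :
    adjust_next_window text index w = adjust_next_window_alt text index w := by
  by_cases hge : index ≥ (text.toList.length : Int) - 1
  · unfold adjust_next_window adjust_next_window_alt
    rw [if_pos hge, if_pos (Or.inl hge)]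
  · by_cases hw0 : w ≤ 0
    · unfold adjust_next_window adjust_next_window_alt
      rw [if_neg hge, if_pos (Or.inr hw0), adjWhile_nonpos _ _ _ _ hw0]
    · have h2 : 1 ≤ w := by omega
      have hlt : index < (text.toList.length : Int) - 1 := by omega
      rw [alt_eq_bval text index w hlt h2]
      by_cases h0 : -1 ≤ index
      · unfold adjust_next_window
        rw [if_neg hge]
        exact adjWhile_eq_bval _ text.toList index w (by omega) h0 h2
      · unfold Pre_adjust_next_window at hpre
        have hpre' : -(text.toList.length : Int) ≤ index + 1 := by omega
        have hn1 : 1 ≤ (text.toList.length : Int) := by omega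
        have hne : text.toList ≠ [] := by
          intro hnil
          rw [hnil] at hn1
          simp at hn1
        have hk : ((-(index + 1)).toNat : Int) = -(index + 1) := by omega
        set k : Nat := (-(index + 1)).toNat with hkdef
        have hk1 : 1 ≤ k := by omega
        have hk2 : k ≤ text.toList.length := by omega
        have hiv : index = -1 - (k : Int) := by omega
        have hslice : PySem.List.slice text.toList (some (index + 1)) none
            = text.toList.drop (text.toList.length - k) := by
          rw [PySem.List.slice_some_none, show index + 1 = -(k : Int) by omega,
            PySem.List.clampIdx_neg_natCast _ k hk1]
        unfold D_adjust_next_window at hnd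
        rw [hslice] at hnd
        have hnd' : ¬ (index ≤ -2 ∧ 1 ≤ w
            ∧ 1 ≤ ((text.toList.drop (text.toList.length - k)).count ' ' : Int)
            ∧ w ≤ ((text.toList.drop (text.toList.length - k)).count ' ' : Int)
                + (text.toList.dropLast.count ' ' : Int)) := hnd
        have ht0 : (0 : Int) ≤ ((text.toList.drop (text.toList.length - k)).count ' ' : Int) := by
          positivity
        have hfuel : ((text.toList.length : Int) - 1 - index).toNat = text.toList.length + k := by
          omega
        unfold adjust_next_window
        rw [if_neg hge]
        rw [hfuel, hiv]
        by_cases ht : ((text.toList.drop (text.toList.length - k)).count ' ' : Int) = 0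
        · rw [adjWhile_neg_phase k text.toList w hk1 hk2 (by omega)]
          rw [show w - ((text.toList.drop (text.toList.length - k)).count ' ' : Int) = w by omega]
          rw [adjWhile_eq_bval text.toList.length text.toList (-1) w (by omega) (by omega) h2]
          unfold bval
          have hfeq : (spacePos text.toList).filter (fun x => decide ((-1 : Int) < x))
              = (spacePos text.toList).filter (fun x => decide ((-1 - (k : Int)) < x)) := by
            apply List.filter_congr
            intro x hx
            have := spacePos_nonneg text.toList x hx
            simp only [decide_eq_decide]
            omega
          rw [hfeq]
        · have hc : ((text.toList.drop (text.toList.length - k)).count ' ' : Int)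
                + (text.toList.dropLast.count ' ' : Int) < w := by
            by_contra hcon
            push Not at hcon
            exact hnd' ⟨by omega, h2, by omega, by omega⟩
          have ht1 : 1 ≤ ((text.toList.drop (text.toList.length - k)).count ' ' : Int) := by omega
          rw [adjWhile_neg_phase k text.toList w hk1 hk2 (by omega)]
          rw [adjWhile_overrun text.toList.length text.toList (-1)
              (w - ((text.toList.drop (text.toList.length - k)).count ' ' : Int)) (by omega)
              (by omega) (by omega)
              (by rw [show ((-1 : Int) + 1) = 0 by ring]
                  simp only [Int.toNat_zero, List.drop_zero]
                  omega)]
          unfold bval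
          have hli : (((spacePos text.toList).filter (fun x => decide ((-1 - (k : Int)) < x))).length : Int)
              ≤ (text.toList.dropLast.count ' ' : Int) + 1 := by
            have h5 := List.length_filter_le (fun x => decide ((-1 - (k : Int)) < x)) (spacePos text.toList)
            have h6 := spacePos_length_le text.toList hne
            have h7 : ((((spacePos text.toList).filter (fun x => decide ((-1 - (k : Int)) < x))).length : Nat) : Int)
                ≤ ((spacePos text.toList).length : Int) := by exact_mod_cast h5
            omega
          rw [if_neg (by omega)]

-- ===== VERDICT (by name: the statement is the Claim_ definition above) =====
theorem adjust_next_window_spec : Claim_unchanged_adjust_next_window := by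
  intro text index n_words _ hpre
  unfold Spec_adjust_next_window
  intro hnd
  exact main_assembly text index n_words hpre hnd

theorem adjust_next_window_changed : Claim_changed_adjust_next_window := by
  unfold Claim_changed_adjust_next_window; decide

lemma spacePos_split (chars : List Char) (h : chars ≠ []) :
    ∃ rest, spacePos chars = spacePos chars.dropLast ++ rest := by
  refine ⟨((PySem.List.enumerate [chars.getLast h] (0 + (chars.dropLast.length : Int))).filter
      (fun pc => decide (pc.2 = ' '))).map (·.1), ?_⟩
  conv_lhs => rw [← List.dropLast_append_getLast h]
  unfold spacePos
  rw [PySem.List.enumerate_append, List.filter_append, List.map_append]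

lemma adjWhile_neg_stop : ∀ (k : Nat) (chars : List Char) (w : Int),
    1 ≤ k → k ≤ chars.length → 1 ≤ w →
    w ≤ ((chars.drop (chars.length - k)).count ' ' : Int) →
    adjWhile chars (chars.length + k) (-1 - (k : Int)) w < 0 := by
  intro k
  induction k with
  | zero => intro chars w h1 _ _ _; omega
  | succ k ih =>
    intro chars w hk1 hk2 h2 hw
    have hidx : chars.length - (k + 1) < chars.length := by omega
    have hdrop : chars.drop (chars.length - (k + 1))
        = chars[chars.length - (k + 1)] :: chars.drop (chars.length - (k + 1) + 1) :=
      List.drop_eq_getElem_cons hidx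
    have hget : PySem.List.pyGet? chars (-1 - ((k : Int) + 1) + 1)
        = some chars[chars.length - (k + 1)] := by
      have he : (-1 - ((k : Int) + 1) + 1) = -((k + 1 : Nat) : Int) := by push_cast; ring
      rw [he, PySem.List.pyGet?_neg_natCast chars (k + 1) (by omega) hk2]
      rw [List.getElem?_eq_getElem hidx]
    have hstep : chars.length - (k + 1) + 1 = chars.length - k := by omega
    rw [hstep] at hdrop
    have hcount : ((chars.drop (chars.length - (k + 1))).count ' ' : Int)
        = ((chars.drop (chars.length - k)).count ' ' : Int)
          + (if chars[chars.length - (k + 1)] = ' ' then 1 else 0) := by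
      rw [hdrop, List.count_cons]
      by_cases hsp : chars[chars.length - (k + 1)] = ' ' <;> simp [hsp]
    have ht0 : k = 0 → ((chars.drop (chars.length - k)).count ' ' : Int) = 0 := by
      intro hk0
      rw [hk0, Nat.sub_zero, List.drop_length]
      simp
    rw [show chars.length + (k + 1) = (chars.length + k) + 1 from rfl, adjWhile_succ]
    push_cast
    rw [if_pos ⟨by omega, by omega⟩]
    simp only [hget]
    rw [show (-1 - ((k : Int) + 1) + 1) = -1 - (k : Int) by ring]
    by_cases hsp : chars[chars.length - (k + 1)] = ' '
    · rw [if_pos hsp]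
      by_cases hw1 : w = 1
      · subst hw1
        rw [adjWhile_nonpos _ _ _ (1 - 1) (by omega)]
        omega
      · have hk0 : 1 ≤ k := by
          by_contra hcon
          have h9 := ht0 (by omega)
          rw [hcount, if_pos hsp] at hw
          omega
        exact ih chars (w - 1) hk0 (by omega) (by omega)
          (by rw [hcount, if_pos hsp] at hw; omega)
    · rw [if_neg hsp]
      have hk0 : 1 ≤ k := by
        by_contra hcon
        have h9 := ht0 (by omega)
        rw [hcount, if_neg hsp] at hw
        omega
      exact ih chars w hk0 (by omega) h2
        (by rw [hcount, if_neg hsp] at hw; omega)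

theorem tight_assembly (text : String) (index w : Int)
    (hpre : Pre_adjust_next_window text index w)
    (hD : D_adjust_next_window text index w) :
    adjust_next_window text index w ≠ adjust_next_window_alt text index w := by
  have hD' : index ≤ -2 ∧ 1 ≤ w
      ∧ 1 ≤ ((PySem.List.slice text.toList (some (index + 1)) none).count ' ' : Int)
      ∧ w ≤ ((PySem.List.slice text.toList (some (index + 1)) none).count ' ' : Int)
          + (text.toList.dropLast.count ' ' : Int) := hD
  obtain ⟨hi2, h2, ht1, hwle⟩ := hD'
  unfold Pre_adjust_next_window at hpre
  have hn0 : (0 : Int) ≤ (text.toList.length : Int) := by positivity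
  have hlt : index < (text.toList.length : Int) - 1 := by omega
  have hpre' : -(text.toList.length : Int) ≤ index + 1 := by omega
  have hk : ((-(index + 1)).toNat : Int) = -(index + 1) := by omega
  set k : Nat := (-(index + 1)).toNat with hkdef
  have hk1 : 1 ≤ k := by omega
  have hk2 : k ≤ text.toList.length := by omega
  have hiv : index = -1 - (k : Int) := by omega
  have hslice : PySem.List.slice text.toList (some (index + 1)) none
      = text.toList.drop (text.toList.length - k) := by
    rw [PySem.List.slice_some_none, show index + 1 = -(k : Int) by omega,
      PySem.List.clampIdx_neg_natCast _ k hk1]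
  rw [hslice] at ht1 hwle
  have hn1 : 1 ≤ text.toList.length := by
    by_contra hcon
    have hl0 : text.toList = [] := List.length_eq_zero_iff.mp (by omega)
    rw [hl0] at ht1
    simp at ht1
  have hne : text.toList ≠ [] := List.ne_nil_of_length_pos (by omega)
  have hfuel : ((text.toList.length : Int) - 1 - index).toNat = text.toList.length + k := by
    omega
  unfold adjust_next_window
  rw [if_neg (by omega : ¬ index ≥ (text.toList.length : Int) - 1)]
  rw [alt_eq_bval text index w hlt h2]
  rw [hfuel, hiv]
  unfold bval
  have hall : (spacePos text.toList).filter (fun x => decide ((-1 - (k : Int)) < x))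
      = spacePos text.toList := by
    rw [List.filter_eq_self]
    intro x hx
    have := spacePos_nonneg text.toList x hx
    simp only [decide_eq_true_eq]
    omega
  rw [hall]
  by_cases hwt : w ≤ ((text.toList.drop (text.toList.length - k)).count ' ' : Int)
  · have hA := adjWhile_neg_stop k text.toList w hk1 hk2 h2 hwt
    by_cases hwB : w ≤ (((spacePos text.toList).length : Nat) : Int)
    · rw [if_pos hwB]
      have hr : (w - 1).toNat < (spacePos text.toList).length := by omega
      rw [List.getD_eq_getElem _ _ hr]
      have hmem := List.getElem_mem hr
      have := spacePos_nonneg text.toList _ hmem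
      omega
    · rw [if_neg hwB]
      omega
  · rw [adjWhile_neg_phase k text.toList w hk1 hk2 (by omega)]
    rw [adjWhile_eq_bval text.toList.length text.toList (-1)
      (w - ((text.toList.drop (text.toList.length - k)).count ' ' : Int))
      (by omega) (by omega) (by omega)]
    unfold bval
    have hallm1 : (spacePos text.toList).filter (fun x => decide ((-1 : Int) < x))
        = spacePos text.toList := by
      rw [List.filter_eq_self]
      intro x hx
      have := spacePos_nonneg text.toList x hx
      simp only [decide_eq_true_eq]
      omega
    rw [hallm1]
    obtain ⟨rest, hsplitSP⟩ := spacePos_split text.toList hne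
    have hs2 : ((spacePos text.toList.dropLast).length : Int)
        = (text.toList.dropLast.count ' ' : Int) := by
      rw [length_spacePos, countP_space_eq_count]
    have huS : (w - ((text.toList.drop (text.toList.length - k)).count ' ' : Int) - 1).toNat
        < (spacePos text.toList.dropLast).length := by omega
    have hlenSP : (spacePos text.toList.dropLast).length ≤ (spacePos text.toList).length := by
      rw [hsplitSP, List.length_append]
      omega
    have hAin : (w - ((text.toList.drop (text.toList.length - k)).count ' ' : Int) - 1).toNat
        < (spacePos text.toList).length := lt_of_lt_of_le huS hlenSP
    rw [if_pos (by omega :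
      w - ((text.toList.drop (text.toList.length - k)).count ' ' : Int)
        ≤ (((spacePos text.toList).length : Nat) : Int))]
    rw [List.getD_eq_getElem _ _ hAin]
    have hAval : (spacePos text.toList)[(w - ((text.toList.drop (text.toList.length - k)).count ' ' : Int) - 1).toNat]'hAin
        = (spacePos text.toList.dropLast)[(w - ((text.toList.drop (text.toList.length - k)).count ' ' : Int) - 1).toNat]'huS := by
      simp only [hsplitSP]
      exact List.getElem_append_left huS
    have hAbound : (spacePos text.toList)[(w - ((text.toList.drop (text.toList.length - k)).count ' ' : Int) - 1).toNat]'hAin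
        < (text.toList.length : Int) - 1 := by
      rw [hAval]
      have hmem := List.getElem_mem huS
      have hb := spacePos_lt_length text.toList.dropLast _ hmem
      rw [List.length_dropLast] at hb
      omega
    by_cases hwB : w ≤ (((spacePos text.toList).length : Nat) : Int)
    · rw [if_pos hwB]
      have hrB : (w - 1).toNat < (spacePos text.toList).length := by omega
      rw [List.getD_eq_getElem _ _ hrB]
      have hmono := List.pairwise_iff_getElem.mp (spacePos_pairwise text.toList)
        _ _ hAin hrB (by omega)
      omega
    · rw [if_neg hwB]
      omega

theorem adjust_next_window_tight : Claim_exact_adjust_next_window := by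
  intro text index n_words _ hpre hD
  exact tight_assembly text index n_words hpre hD
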